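-- pv_equiv track=rewrite | github.com/Jxck-S/CIS3362 | pa02/pa02.py | calc_pad
-- ===== SOURCE A (Python) =====
-- def calc_pad(str_in, bits):
--     pad = 0
--     str_len = len(str_in)
--     mod = 4 if bits == 32 else 2
--     while (str_len % mod != 0):
--         str_len += 1
--         pad += 1
--     return pad if bits > 8 else 0
-- ===== SOURCE B (Python) =====
-- def calc_pad(str_in, bits):
--     mod = 4 if bits == 32 else 2
--     pad = (mod - len(str_in) % mod) % mod
--     return pad if bits > 8 else 0
-- ===== Notes on version B (the rewrite author's own statement) =====
-- stated objective: simpler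
-- what changed: Replaces the increment-and-count while-loop with the closed-form modular expression (mod - len % mod) % mod.
import Mathlib
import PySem

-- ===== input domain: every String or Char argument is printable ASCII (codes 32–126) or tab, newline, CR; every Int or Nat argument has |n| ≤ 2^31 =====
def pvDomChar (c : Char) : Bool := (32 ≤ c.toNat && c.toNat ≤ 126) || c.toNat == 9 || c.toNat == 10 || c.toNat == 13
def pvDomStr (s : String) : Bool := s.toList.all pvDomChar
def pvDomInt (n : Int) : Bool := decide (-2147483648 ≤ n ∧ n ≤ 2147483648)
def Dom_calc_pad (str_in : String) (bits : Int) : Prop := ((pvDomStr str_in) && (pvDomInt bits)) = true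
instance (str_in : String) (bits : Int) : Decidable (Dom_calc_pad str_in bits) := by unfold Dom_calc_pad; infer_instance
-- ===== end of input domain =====

-- B replaces A's counting while-loop by the closed form (mod - len % mod) % mod; objective: simpler.

-- ===== PORT A =====
-- A's while-loop: while str_len % mod != 0: str_len += 1; pad += 1
-- (the `0 < mod` conjunct is only a totality guard; A only ever runs this with mod = 2 or 4, where it is true)
def calcPadLoop (mod str_len pad : Int) : Int :=
  if h : 0 < mod ∧ PySem.Int.mod str_len mod ≠ 0 then
    calcPadLoop mod (str_len + 1) (pad + 1)
  else pad
termination_by ((mod - PySem.Int.mod str_len mod) % mod).toNat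
decreasing_by
  have hb := h.1
  have h0 : PySem.Int.mod str_len mod = str_len % mod := PySem.Int.mod_eq_emod_of_pos hb
  have h1 : PySem.Int.mod (str_len + 1) mod = (str_len + 1) % mod := PySem.Int.mod_eq_emod_of_pos hb
  have hlt : str_len % mod < mod := Int.emod_lt_of_pos _ hb
  have hge : 0 ≤ str_len % mod := Int.emod_nonneg _ (by omega)
  have h2 : (str_len + 1) % mod = (str_len % mod + 1) % mod := by
    conv_rhs => rw [Int.add_emod, Int.emod_emod_of_dvd _ dvd_rfl, ← Int.add_emod]
  have hne := h.2; rw [h0] at hne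
  rw [h1, h2, h0]
  by_cases hc : str_len % mod + 1 = mod
  · have e0 : (str_len % mod + 1) % mod = 0 := by rw [hc, Int.emod_self]
    rw [e0]
    have e2 : (mod - str_len % mod) % mod = mod - str_len % mod :=
      Int.emod_eq_of_lt (by omega) (by omega)
    simp only [Int.sub_zero, Int.emod_self]
    omega
  · have e0 : (str_len % mod + 1) % mod = str_len % mod + 1 :=
      Int.emod_eq_of_lt (by omega) (by omega)
    rw [e0]
    have e1 : (mod - (str_len % mod + 1)) % mod = mod - (str_len % mod + 1) :=
      Int.emod_eq_of_lt (by omega) (by omega)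
    have e2 : (mod - str_len % mod) % mod = mod - str_len % mod :=
      Int.emod_eq_of_lt (by omega) (by omega)
    rw [e1, e2]; omega

def calc_pad (str_in : String) (bits : Int) : Int :=
  let pad : Int := 0
  let str_len : Int := PySem.Str.len str_in
  let mod : Int := if bits == 32 then 4 else 2
  let pad := calcPadLoop mod str_len pad
  if bits > 8 then pad else 0

-- ===== PORT B =====
def calc_pad_alt (str_in : String) (bits : Int) : Int :=
  let mod : Int := if bits == 32 then 4 else 2
  let pad : Int := PySem.Int.mod (mod - PySem.Int.mod (PySem.Str.len str_in) mod) mod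
  if bits > 8 then pad else 0

-- ===== PRECONDITION & SPEC =====
def Spec_calc_pad (str_in : String) (bits : Int) (out : Int) : Prop := out = calc_pad_alt str_in bits
instance (str_in : String) (bits : Int) (out : Int) : Decidable (Spec_calc_pad str_in bits out) := by unfold Spec_calc_pad; infer_instance

-- ===== CLAIM (what is proved, stated in full; the proofs are below) =====
def Claim_equal_calc_pad : Prop := ∀ (str_in : String) (bits : Int), Dom_calc_pad str_in bits → Spec_calc_pad str_in bits (calc_pad str_in bits)

-- ===== LEMMAS AND PROOFS =====

-- the loop computes pad + (mod - L % mod) % mod, for any positive mod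
theorem calcPadLoop_closed (mod L pad : Int) (hb : 0 < mod) :
    calcPadLoop mod L pad = pad + (mod - PySem.Int.mod L mod) % mod := by
  fun_induction calcPadLoop mod L pad with
  | case1 L pad h ih =>
    have h0 : PySem.Int.mod L mod = L % mod := PySem.Int.mod_eq_emod_of_pos hb
    have h1 : PySem.Int.mod (L + 1) mod = (L + 1) % mod := PySem.Int.mod_eq_emod_of_pos hb
    have hlt : L % mod < mod := Int.emod_lt_of_pos _ hb
    have hge : 0 ≤ L % mod := Int.emod_nonneg _ (by omega)
    have h2 : (L + 1) % mod = (L % mod + 1) % mod := by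
      conv_rhs => rw [Int.add_emod, Int.emod_emod_of_dvd _ dvd_rfl, ← Int.add_emod]
    have hne := h.2; rw [h0] at hne
    rw [ih, h1, h2, h0]
    by_cases hc : L % mod + 1 = mod
    · have e0 : (L % mod + 1) % mod = 0 := by rw [hc, Int.emod_self]
      rw [e0]
      have e2 : (mod - L % mod) % mod = mod - L % mod :=
        Int.emod_eq_of_lt (by omega) (by omega)
      simp only [Int.sub_zero, Int.emod_self]
      omega
    · have e0 : (L % mod + 1) % mod = L % mod + 1 :=
        Int.emod_eq_of_lt (by omega) (by omega)
      rw [e0]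
      have e1 : (mod - (L % mod + 1)) % mod = mod - (L % mod + 1) :=
        Int.emod_eq_of_lt (by omega) (by omega)
      have e2 : (mod - L % mod) % mod = mod - L % mod :=
        Int.emod_eq_of_lt (by omega) (by omega)
      rw [e1, e2]; omega
  | case2 L pad h =>
    have hz : PySem.Int.mod L mod = 0 := by
      by_contra hc; exact h ⟨hb, hc⟩
    rw [hz]; simp

-- ===== VERDICT (by name: the statement is the Claim_ definition above) =====
theorem calc_pad_spec : Claim_equal_calc_pad := by
  unfold Claim_equal_calc_pad
  intro str_in bits _
  unfold Spec_calc_pad calc_pad calc_pad_alt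
  by_cases h32 : bits == 32 <;>
    simp only [h32, if_true, if_false, Bool.false_eq_true] <;>
    rw [calcPadLoop_closed _ _ _ (by norm_num)] <;>
    rw [PySem.Int.mod_eq_emod_of_pos (by norm_num)] <;>
    simp
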